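-- pv_equiv track=rewrite | github.com/com-chain/pyc3l-cli | src/pyc3l_cli/cmd/report.py | range_remove
-- ===== SOURCE A (Python) =====
-- def range_remove(target_range, current_block_ranges):
--     """Return the ranges (s, e) of missing blocks in the range [start, end]
--
--     >>> range_remove((1, 10), [(1, 5), (7, 12)])
--     [(6, 6)]
--     >>> range_remove((1, 10), [(0, 3), (7, 8)])
--     [(4, 6), (9, 10)]
--     >>> range_remove((1, 10), [(0, 10)])
--     []
--     >>> range_remove((1, 10), [(6, 6)])
--     [(1, 5), (7, 10)]
--
--     """
--     (start, end) = target_range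
--     ## find missing blocks
--     missing_block_ranges = []
--     for s, e in current_block_ranges:
--         if e < start:
--             continue
--         if start < s:
--             if end < s:
--                 missing_block_ranges.append((start, end))
--                 return missing_block_ranges
--             ## start < s <= end
--             missing_block_ranges.append((start, s - 1))
--             if e > end:
--                 return missing_block_ranges
--             ## start < s <= e <= end
--             start = e + 1
--             continue
--         ## s <= start <= e
--         start = e + 1
--         continue
--     if start <= end:
--         missing_block_ranges.append((start, end))
--     return missing_block_ranges
-- ===== SOURCE B (Python) =====
-- def range_remove(target_range, current_block_ranges):
--     (start, end) = target_range
--     # phase 1: cursor table -- the cursor value in force before each block,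
--     # computed independently of any gap output
--     cursors = [start]
--     for s, e in current_block_ranges:
--         c = cursors[-1]
--         cursors.append(c if e < c else e + 1)
--     # phase 2: the gap-producing events are exactly the blocks strictly ahead
--     # of their cursor (all other blocks only move the cursor, done in phase 1)
--     events = [(c, s, e) for (s, e), c in zip(current_block_ranges, cursors)
--               if c <= e and c < s]
--     # phase 3: emit one gap per event, with the clipping/stop rules at `end`
--     out = []
--     for c, s, e in events:
--         if end < s:
--             return out + [(c, end)]
--         out.append((c, s - 1))
--         if e > end:
--             return out
--     if cursors[-1] <= end:
--         out.append((cursors[-1], end))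
--     return out
-- ===== Notes on version B (the rewrite author's own statement) =====
-- stated objective: alternative
-- what changed: A's fused branchy sweep is replaced by three staged passes: a scan building the table of cursor values before each block, a filter over blocks zipped with that table extracting the gap-producing events, and a simple emit loop over the events with the clipping/stop rules.
import Mathlib
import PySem

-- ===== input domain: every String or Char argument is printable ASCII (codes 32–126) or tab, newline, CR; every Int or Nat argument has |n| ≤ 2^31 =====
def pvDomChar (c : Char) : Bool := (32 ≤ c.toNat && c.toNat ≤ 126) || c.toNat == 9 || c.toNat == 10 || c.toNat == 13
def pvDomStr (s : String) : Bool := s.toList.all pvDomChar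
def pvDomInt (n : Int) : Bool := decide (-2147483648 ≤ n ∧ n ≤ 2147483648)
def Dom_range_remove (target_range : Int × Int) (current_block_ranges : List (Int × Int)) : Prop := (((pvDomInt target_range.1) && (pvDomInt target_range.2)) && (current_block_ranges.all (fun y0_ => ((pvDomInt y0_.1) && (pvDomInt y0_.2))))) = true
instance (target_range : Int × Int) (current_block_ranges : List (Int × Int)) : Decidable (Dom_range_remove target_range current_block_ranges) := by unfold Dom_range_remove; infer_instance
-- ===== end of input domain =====

-- B replaces A's fused branchy sweep by three staged passes (cursor-table scan, event filter, emit loop) — same O(n) cost, different decomposition.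


-- ===== PORT A =====
-- A's single sweep: cursor `start`, branch per block, early returns, final tail gap.
def rangeRemoveALoop (endv : Int) (start : Int) (acc : List (Int × Int)) :
    List (Int × Int) → List (Int × Int)
  | [] => if start ≤ endv then acc ++ [(start, endv)] else acc
  | (s, e) :: rest =>
    if e < start then rangeRemoveALoop endv start acc rest
    else if start < s then
      if endv < s then acc ++ [(start, endv)]
      else if e > endv then acc ++ [(start, s - 1)]
      else rangeRemoveALoop endv (e + 1) (acc ++ [(start, s - 1)]) rest
    else rangeRemoveALoop endv (e + 1) acc rest

def range_remove (target_range : Int × Int) (current_block_ranges : List (Int × Int)) : List (Int × Int) :=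
  rangeRemoveALoop target_range.2 target_range.1 [] current_block_ranges

-- ===== PORT B =====
-- phase 1: the table of cursor values in force before each block (length n+1)
def rrCursors (c : Int) : List (Int × Int) → List Int
  | [] => [c]
  | (_, e) :: rest => c :: rrCursors (if e < c then c else e + 1) rest

-- phase 2: select the gap-producing events from blocks zipped with their cursors
def rrEvents (zipped : List ((Int × Int) × Int)) : List (Int × Int × Int) :=
  zipped.filterMap (fun p =>
    if p.2 ≤ p.1.2 ∧ p.2 < p.1.1 then some (p.2, p.1.1, p.1.2) else none)

-- phase 3: emit one gap per event, clipping/stopping at `endv`; `fin` is the final cursor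
def rrEmit (endv : Int) (fin : Int) (out : List (Int × Int)) :
    List (Int × Int × Int) → List (Int × Int)
  | [] => if fin ≤ endv then out ++ [(fin, endv)] else out
  | (c, s, e) :: rest =>
    if endv < s then out ++ [(c, endv)]
    else if e > endv then out ++ [(c, s - 1)]
    else rrEmit endv fin (out ++ [(c, s - 1)]) rest

def range_remove_alt (target_range : Int × Int) (current_block_ranges : List (Int × Int)) : List (Int × Int) :=
  let cursors := rrCursors target_range.1 current_block_ranges
  rrEmit target_range.2 (cursors.getLastD target_range.1) []
    (rrEvents (current_block_ranges.zip cursors))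

-- ===== PRECONDITION & SPEC =====
def Spec_range_remove (target_range : Int × Int) (current_block_ranges : List (Int × Int)) (out : List (Int × Int)) : Prop := out = range_remove_alt target_range current_block_ranges
instance (target_range : Int × Int) (current_block_ranges : List (Int × Int)) (out : List (Int × Int)) : Decidable (Spec_range_remove target_range current_block_ranges out) := by unfold Spec_range_remove; infer_instance

-- ===== CLAIM =====
def Claim_equal_range_remove : Prop := ∀ (target_range : Int × Int) (current_block_ranges : List (Int × Int)), Dom_range_remove target_range current_block_ranges → Spec_range_remove target_range current_block_ranges (range_remove target_range current_block_ranges)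

-- ===== LEMMAS AND PROOFS =====

-- The cursor table is nonempty, so its last element does not depend on the default.
theorem rrCursors_getLastD (l : List (Int × Int)) (c d₁ d₂ : Int) :
    (rrCursors c l).getLastD d₁ = (rrCursors c l).getLastD d₂ := by
  cases l with
  | nil => rfl
  | cons h t =>
    show ((c :: rrCursors _ t).getLastD d₁) = ((c :: rrCursors _ t).getLastD d₂)
    rw [List.getLastD_cons, List.getLastD_cons]

-- A's sweep equals B's staged passes started at the same cursor.
theorem rangeRemoveALoop_eq (endv : Int) (blocks : List (Int × Int)) :
    ∀ (start : Int) (acc : List (Int × Int)),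
      rangeRemoveALoop endv start acc blocks =
        rrEmit endv ((rrCursors start blocks).getLastD start) acc
          (rrEvents (blocks.zip (rrCursors start blocks))) := by
  induction blocks with
  | nil => intro start acc; simp [rangeRemoveALoop, rrCursors, rrEvents, rrEmit]
  | cons hd rest ih =>
    intro start acc
    obtain ⟨s, e⟩ := hd
    by_cases hskip : e < start
    · have hnot : ¬ (start ≤ e ∧ start < s) := by omega
      simp only [rangeRemoveALoop, rrCursors, if_pos hskip,
        List.zip_cons_cons, rrEvents, List.filterMap_cons, if_neg hnot,
        List.getLastD_cons, ih]
    · have hke : ¬ e < start := hskip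
      by_cases hlt : start < s
      · have hkeep : start ≤ e ∧ start < s := by omega
        simp only [rangeRemoveALoop, if_pos hlt, rrCursors, if_neg hke,
          List.zip_cons_cons, rrEvents, List.filterMap_cons, if_pos hkeep,
          List.getLastD_cons, rrEmit]
        by_cases h1 : endv < s
        · simp [h1]
        · by_cases h2 : e > endv
          · simp [h1, h2]
          · rw [ih, rrCursors_getLastD rest (e + 1) (e + 1) start]
            simp [h1, h2, rrEvents]
      · have hnot : ¬ (start ≤ e ∧ start < s) := by omega
        simp only [rangeRemoveALoop, if_neg hlt, rrCursors, if_neg hke,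
          List.zip_cons_cons, rrEvents, List.filterMap_cons, if_neg hnot,
          List.getLastD_cons, ih]
        rw [rrCursors_getLastD rest (e + 1) (e + 1) start]

-- ===== VERDICT =====
theorem range_remove_spec : Claim_equal_range_remove := by
  intro tr blocks _
  unfold Spec_range_remove range_remove range_remove_alt
  exact rangeRemoveALoop_eq tr.2 blocks tr.1 []
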